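-- pv_equiv track=rewrite | github.com/jun9898/krafton-jungle-study | algorithm/2408/240824/solved3.py | max_dolphins_dp
-- ===== SOURCE A (Python) =====
-- def max_dolphins_dp(N, K, M):
--     dp = [[-1] * (1 << N) for _ in range(K + 1)]
--     dp[0][0] = 0  # 시작 상태
--
--     for t in range(K):
--         for cam in range(1 << N):
--             if dp[t][cam] == -1:
--                 continue
--
--             dp[t + 1][cam] = max(dp[t + 1][cam], dp[t][cam])
--
--             for i in range(N):
--                 new_cam = cam | (1 << i)
--                 dp[t + 1][new_cam] = max(dp[t + 1][new_cam], dp[t][cam])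
--
--             for i in range(N):
--                 if cam & (1 << i) and M[i][t] == 1:
--                     dp[t + 1][cam] = max(dp[t + 1][cam], dp[t][cam] + 1)
--
--     return max(dp[K])
-- ===== SOURCE B (Python) =====
-- def max_dolphins_dp(N, K, M):
--     # backward value iteration: best[cam] = max additional score from turn t onward
--     best = [0] * (1 << N)                     # t = K: nothing left to gain
--     for t in range(K - 1, -1, -1):
--         new = []
--         for cam in range(1 << N):
--             res = best[cam]                   # stay (score if a camera covers turn t)
--             if any(cam & (1 << i) and M[i][t] == 1 for i in range(N)):
--                 res += 1
--             for i in range(N):                # or install camera i this turn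
--                 r = best[cam | (1 << i)]
--                 if r > res:
--                     res = r
--             new.append(res)
--         best = new
--     return best[0]
-- ===== Notes on version B (the rewrite author's own statement) =====
-- stated objective: alternative
-- what changed: Replaces A's forward reachability DP (dp[t][cam] = best score reaching that state, -1 markers, relaxations pushed to successors, answer = max over dp[K]) by a backward value-iteration suffix DP best[cam] = best additional score from turn t onward, pulled from successors, returning best[0] at t = 0.
-- outside the precondition, e.g. on max_dolphins_dp(4, 1, []): A returns 0, B raises IndexError
import Mathlib
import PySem

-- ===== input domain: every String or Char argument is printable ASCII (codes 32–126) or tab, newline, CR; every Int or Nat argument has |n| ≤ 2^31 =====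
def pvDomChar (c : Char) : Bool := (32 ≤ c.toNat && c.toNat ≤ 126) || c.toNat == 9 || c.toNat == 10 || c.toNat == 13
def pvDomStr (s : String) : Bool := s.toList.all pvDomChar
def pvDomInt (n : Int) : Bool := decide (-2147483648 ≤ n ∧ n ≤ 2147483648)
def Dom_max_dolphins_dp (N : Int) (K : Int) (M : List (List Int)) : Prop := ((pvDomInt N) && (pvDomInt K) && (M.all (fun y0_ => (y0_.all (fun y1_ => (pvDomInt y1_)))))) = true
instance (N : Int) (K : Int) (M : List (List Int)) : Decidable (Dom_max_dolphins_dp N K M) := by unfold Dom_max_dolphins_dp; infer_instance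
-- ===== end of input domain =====

-- B replaces A's bottom-up forward DP table (answer = max over end states) by a
-- top-down memoized suffix recursion best(t, cam) with answer best(0, 0); alternative
-- decomposition, similar cost.

-- shared truthiness test of A's and B's identical Python condition `cam & (1 << i) and M[i][t] == 1`
def condB (M : List (List Int)) (t i cam : Nat) : Bool :=
  cam &&& (1 <<< i) != 0 && ((M.getD i []).getD t 0) == 1

-- ===== PORT A =====
-- dp[t+1][c] = max(dp[t+1][c], v)  (index always in range on Pre_; getD default is never read there)
def aRelax (row : List Int) (c : Nat) (v : Int) : List Int :=
  row.set c (max (row.getD c (-1)) v)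

-- body of A's `for cam in range(1 << N)` loop: updates row dp[t+1] from row dp[t]
def aInner (n : Nat) (M : List (List Int)) (t : Nat) (rowt : List Int)
    (row : List Int) (cam : Nat) : List Int :=
  let v := rowt.getD cam (-1)
  if v = -1 then row
  else
    let row1 := aRelax row cam v
    let row2 := (List.range n).foldl (fun r i => aRelax r (cam ||| (1 <<< i)) v) row1
    (List.range n).foldl (fun r i => if condB M t i cam then aRelax r cam (v + 1) else r) row2

-- 1 << N is 1 <<< N.toNat; range(1 << N) is List.range of that Nat
def max_dolphins_dp (N : Int) (K : Int) (M : List (List Int)) : Int :=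
  let n := N.toNat
  let k := K.toNat
  let W := 1 <<< n
  let dp0 : List (List Int) := (List.range (k + 1)).map (fun _ => List.replicate W (-1))
  let dp1 := dp0.set 0 ((dp0.getD 0 []).set 0 0)          -- dp[0][0] = 0
  let dp := (List.range k).foldl
      (fun dp t =>
        dp.set (t + 1) ((List.range W).foldl (aInner n M t (dp.getD t [])) (dp.getD (t + 1) []))) dp1
  (PySem.List.max? (dp.getD k []) (fun x => x)).getD 0    -- max(dp[K]); row never empty

-- ===== PORT B =====
-- any(cam & (1 << i) and M[i][t] == 1 for i in range(N))
def bCover (n : Nat) (M : List (List Int)) (t cam : Nat) : Bool :=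
  (List.range n).any (fun i => condB M t i cam)

-- backward value iteration over turns t = K-1 .. 0; best[cam] = best additional score from t on
def max_dolphins_dp_alt (N : Int) (K : Int) (M : List (List Int)) : Int :=
  let n := N.toNat
  let W := 1 <<< n
  let best0 : List Int := List.replicate W 0
  let best := (PySem.List.pyRange (K - 1) (-1) (-1)).foldl
    (fun best t =>
      (List.range W).foldl
        (fun new cam =>
          let res := best.getD cam 0
          let res := if bCover n M t.toNat cam then res + 1 else res
          let res := (List.range n).foldl
            (fun res i =>
              if best.getD (cam ||| (1 <<< i)) 0 > res then best.getD (cam ||| (1 <<< i)) 0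
              else res) res
          new ++ [res])
        []) best0
  best.getD 0 0

-- ===== PRECONDITION & SPEC =====
-- Pre_ is the function's natural domain: N, K ≥ 0 (a negative N or K makes Python A raise
-- ValueError/IndexError at once) and, unless K = 0 or N = 0, a well-shaped M with at least N rows
-- of length ≥ K (A raises IndexError on shorter M whenever K ≥ 2, since it reads M[i][t] for every
-- i < N, 1 ≤ t < K). Pre_ also excludes the malformed corner K = 1, N ≥ 1 with M lacking N rows of
-- length ≥ 1: A's forward pass reaches no installed camera by turn 0 and returns 0 without reading
-- M, while B's backward pass reads M[i][0] and raises — M not being an N-by-K matrix is outside the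
-- task's natural domain.
def Pre_max_dolphins_dp (N : Int) (K : Int) (M : List (List Int)) : Prop :=
  0 ≤ N ∧ 0 ≤ K ∧
    (K = 0 ∨ N = 0 ∨ (N ≤ (M.length : Int) ∧ ∀ row ∈ M.take N.toNat, K ≤ (row.length : Int)))

instance (N : Int) (K : Int) (M : List (List Int)) : Decidable (Pre_max_dolphins_dp N K M) := by
  unfold Pre_max_dolphins_dp; infer_instance

def pvWitness_max_dolphins_dp : Int × Int × List (List Int) := (2, 3, [[1, 0, 1], [0, 1, 0]])

def Spec_max_dolphins_dp (N : Int) (K : Int) (M : List (List Int)) (out : Int) : Prop :=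
  out = max_dolphins_dp_alt N K M
instance (N : Int) (K : Int) (M : List (List Int)) (out : Int) :
    Decidable (Spec_max_dolphins_dp N K M out) := by unfold Spec_max_dolphins_dp; infer_instance

-- ===== CLAIM (what is proved, stated in full; the proofs are below) =====
def Claim_equal_max_dolphins_dp : Prop := ∀ (N : Int) (K : Int) (M : List (List Int)),
  Dom_max_dolphins_dp N K M → Pre_max_dolphins_dp N K M →
    Spec_max_dolphins_dp N K M (max_dolphins_dp N K M)

-- ===== LEMMAS AND PROOFS =====

-- generic fold helpers ------------------------------------------------------

theorem foldl_flatMap' {α β σ : Type} (g : α → List β) (h : σ → β → σ) :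
    ∀ (l : List α) (s : σ),
      (l.flatMap g).foldl h s = l.foldl (fun s x => (g x).foldl h s) s := by
  intro l
  induction l with
  | nil => intro s; rfl
  | cons x xs ih => intro s; simp [List.flatMap_cons, List.foldl_append, ih]

theorem foldl_max_le_int {α : Type} (g : α → Int) (X : Int) :
    ∀ (l : List α) (a : Int), a ≤ X → (∀ x ∈ l, g x ≤ X) →
      l.foldl (fun a x => max a (g x)) a ≤ X := by
  intro l
  induction l with
  | nil => intro a ha _; exact ha
  | cons x xs ih =>
    intro a ha h
    exact ih _ (max_le ha (h x (by simp))) (fun y hy => h y (by simp [hy]))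

theorem foldl_max_const {α : Type} (g : α → Int) :
    ∀ (l : List α) (a : Int), (∀ x ∈ l, g x ≤ a) →
      l.foldl (fun a x => max a (g x)) a = a := by
  intro l
  induction l with
  | nil => intro a _; rfl
  | cons x xs ih =>
    intro a h
    have hx : max a (g x) = a := max_eq_left (h x (by simp))
    simp only [List.foldl_cons, hx]
    exact ih _ (fun y hy => h y (by simp [hy]))

-- max over a list as a fold over its indices
theorem list_max_fold : ∀ (l : List Int) (a : Int),
    l.foldl max a = (List.range l.length).foldl (fun acc c => max acc (l.getD c (-1))) a := by
  intro l
  induction l with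
  | nil => intro a; rfl
  | cons x xs ih =>
    intro a
    simp only [List.length_cons, List.range_succ_eq_map, List.foldl_cons, List.foldl_map]
    simpa [List.getD_cons_succ, List.getD_cons_zero] using ih (max a x)

-- relaxation folds ----------------------------------------------------------

theorem getD_set_int (l : List Int) (m c : Nat) (v d : Int) :
    (l.set m v).getD c d = if m = c ∧ m < l.length then v else l.getD c d := by
  by_cases hm : m = c ∧ m < l.length
  · obtain ⟨rfl, hlt⟩ := hm
    simp [List.getD_eq_getElem?_getD, hlt]
  · rw [if_neg hm]
    by_cases hc : m = c
    · subst hc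
      have hge : l.length ≤ m := by
        by_contra h; exact hm ⟨rfl, by omega⟩
      rw [List.set_eq_of_length_le hge]
    · simp [List.getD_eq_getElem?_getD, List.getElem?_set_ne hc]

theorem length_aRelax (row : List Int) (c : Nat) (v : Int) :
    (aRelax row c v).length = row.length := by
  simp [aRelax]

theorem length_relaxFold : ∀ (ps : List (Nat × Int)) (row : List Int),
    (ps.foldl (fun r p => aRelax r p.1 p.2) row).length = row.length := by
  intro ps
  induction ps with
  | nil => intro row; rfl
  | cons p ps ih => intro row; rw [List.foldl_cons, ih, length_aRelax]

theorem relaxFold_getD : ∀ (ps : List (Nat × Int)) (row : List Int) (c : Nat),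
    (∀ p ∈ ps, p.1 < row.length) →
    (ps.foldl (fun r p => aRelax r p.1 p.2) row).getD c (-1)
      = ps.foldl (fun a p => if p.1 = c then max a p.2 else a) (row.getD c (-1)) := by
  intro ps
  induction ps with
  | nil => intro row c _; rfl
  | cons p ps ih =>
    intro row c hp
    have hlen : p.1 < row.length := hp p (by simp)
    rw [List.foldl_cons, List.foldl_cons,
      ih _ _ (by intro q hq; rw [length_aRelax]; exact hp q (by simp [hq]))]
    congr 1
    rw [aRelax, getD_set_int]
    by_cases hc : p.1 = c
    · subst hc; simp [hlen]
    · simp [hc]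

-- accumulator-fold (pointwise characterisation of a relaxation round) -------

theorem accFold_init_le (c : Nat) : ∀ (ps : List (Nat × Int)) (a : Int),
    a ≤ ps.foldl (fun a p => if p.1 = c then max a p.2 else a) a := by
  intro ps
  induction ps with
  | nil => intro a; exact le_refl a
  | cons p ps ih =>
    intro a
    rw [List.foldl_cons]
    refine le_trans ?_ (ih _)
    by_cases h : p.1 = c <;> simp [h]

theorem accFold_le_of_mem (c : Nat) : ∀ (ps : List (Nat × Int)) (a : Int) (p : Nat × Int),
    p ∈ ps → p.1 = c → p.2 ≤ ps.foldl (fun a p => if p.1 = c then max a p.2 else a) a := by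
  intro ps
  induction ps with
  | nil => intro a p hp; exact absurd hp (by simp)
  | cons q ps ih =>
    intro a p hp hc
    rw [List.foldl_cons]
    rcases List.mem_cons.mp hp with rfl | hmem
    · refine le_trans ?_ (accFold_init_le c ps _)
      simp [hc]
    · exact ih _ p hmem hc

theorem accFold_attain (c : Nat) : ∀ (ps : List (Nat × Int)) (a : Int),
    ps.foldl (fun a p => if p.1 = c then max a p.2 else a) a = a ∨
      ∃ p ∈ ps, p.1 = c ∧ ps.foldl (fun a p => if p.1 = c then max a p.2 else a) a = p.2 := by
  intro ps
  induction ps with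
  | nil => intro a; exact Or.inl rfl
  | cons q ps ih =>
    intro a
    rw [List.foldl_cons]
    by_cases hq : q.1 = c
    · rcases ih (if q.1 = c then max a q.2 else a) with h | ⟨p, hp, hpc, hval⟩
      · rw [h, if_pos hq]
        rcases max_cases a q.2 with ⟨h1, _⟩ | ⟨h1, _⟩
        · exact Or.inl h1
        · exact Or.inr ⟨q, by simp, hq, h1⟩
      · exact Or.inr ⟨p, by simp [hp], hpc, hval⟩
    · rcases ih (if q.1 = c then max a q.2 else a) with h | ⟨p, hp, hpc, hval⟩
      · rw [h, if_neg hq]; exact Or.inl rfl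
      · exact Or.inr ⟨p, by simp [hp], hpc, hval⟩

-- the mathematical rows of A's forward DP -----------------------------------

def percam (n : Nat) (M : List (List Int)) (t : Nat) (f : Nat → Int) (cam : Nat) :
    List (Nat × Int) :=
  if f cam = -1 then []
  else (cam, f cam) ::
    ((List.range n).map (fun i => (cam ||| (1 <<< i), f cam))
      ++ (List.range n).filterMap (fun i => if condB M t i cam then some (cam, f cam + 1) else none))

def ups (n : Nat) (M : List (List Int)) (t : Nat) (f : Nat → Int) : List (Nat × Int) :=
  (List.range (1 <<< n)).flatMap (percam n M t f)

def rowL (n : Nat) (M : List (List Int)) : Nat → List Int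
  | 0 => (List.replicate (1 <<< n) (-1 : Int)).set 0 0
  | t + 1 =>
    (ups n M t (fun cam => (rowL n M t).getD cam (-1))).foldl
      (fun r p => aRelax r p.1 p.2) (List.replicate (1 <<< n) (-1))

def rowV (n : Nat) (M : List (List Int)) (t c : Nat) : Int := (rowL n M t).getD c (-1)

theorem length_rowL (n : Nat) (M : List (List Int)) : ∀ t, (rowL n M t).length = 1 <<< n := by
  intro t
  cases t with
  | zero => simp [rowL]
  | succ t => rw [rowL, length_relaxFold, List.length_replicate]

theorem one_shiftLeft_pos (n : Nat) : 0 < 1 <<< n := by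
  rw [Nat.one_shiftLeft]; exact Nat.two_pow_pos n

theorem or_lt_shift {n cam i : Nat} (hcam : cam < 1 <<< n) (hi : i < n) :
    cam ||| (1 <<< i) < 1 <<< n := by
  simp only [Nat.one_shiftLeft] at hcam ⊢
  exact Nat.or_lt_two_pow hcam (Nat.pow_lt_pow_right (by omega) hi)

theorem mem_ups_elim {n : Nat} {M : List (List Int)} {t : Nat} {f : Nat → Int} {p : Nat × Int}
    (hp : p ∈ ups n M t f) :
    ∃ cam, cam < 1 <<< n ∧ f cam ≠ -1 ∧
      (p = (cam, f cam) ∨ (∃ i, i < n ∧ p = (cam ||| (1 <<< i), f cam)) ∨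
        (∃ i, i < n ∧ condB M t i cam = true ∧ p = (cam, f cam + 1))) := by
  rw [ups, List.mem_flatMap] at hp
  obtain ⟨cam, hcam, hmem⟩ := hp
  rw [List.mem_range] at hcam
  rw [percam] at hmem
  by_cases hf : f cam = -1
  · rw [if_pos hf] at hmem; exact absurd hmem (by simp)
  · rw [if_neg hf] at hmem
    refine ⟨cam, hcam, hf, ?_⟩
    rcases List.mem_cons.mp hmem with h | hmem
    · exact Or.inl h
    rcases List.mem_append.mp hmem with h | h
    · rw [List.mem_map] at h
      obtain ⟨i, hi, hpi⟩ := h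
      exact Or.inr (Or.inl ⟨i, List.mem_range.mp hi, hpi.symm⟩)
    · rw [List.mem_filterMap] at h
      obtain ⟨i, hi, hpi⟩ := h
      by_cases hc : condB M t i cam = true
      · rw [if_pos hc] at hpi
        exact Or.inr (Or.inr ⟨i, List.mem_range.mp hi, hc, (Option.some_inj.mp hpi).symm⟩)
      · rw [if_neg hc] at hpi; exact absurd hpi (by simp)

theorem mem_ups_stay {n : Nat} {M : List (List Int)} {t : Nat} {f : Nat → Int} {cam : Nat}
    (hcam : cam < 1 <<< n) (hf : f cam ≠ -1) : (cam, f cam) ∈ ups n M t f := by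
  rw [ups, List.mem_flatMap]
  exact ⟨cam, List.mem_range.mpr hcam, by rw [percam, if_neg hf]; simp⟩

theorem mem_ups_install {n : Nat} {M : List (List Int)} {t : Nat} {f : Nat → Int} {cam i : Nat}
    (hcam : cam < 1 <<< n) (hf : f cam ≠ -1) (hi : i < n) :
    (cam ||| (1 <<< i), f cam) ∈ ups n M t f := by
  rw [ups, List.mem_flatMap]
  refine ⟨cam, List.mem_range.mpr hcam, ?_⟩
  rw [percam, if_neg hf]
  refine List.mem_cons_of_mem _ (List.mem_append_left _ ?_)
  exact List.mem_map.mpr ⟨i, List.mem_range.mpr hi, rfl⟩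

theorem mem_ups_score {n : Nat} {M : List (List Int)} {t : Nat} {f : Nat → Int} {cam i : Nat}
    (hcam : cam < 1 <<< n) (hf : f cam ≠ -1) (hi : i < n) (hc : condB M t i cam = true) :
    (cam, f cam + 1) ∈ ups n M t f := by
  rw [ups, List.mem_flatMap]
  refine ⟨cam, List.mem_range.mpr hcam, ?_⟩
  rw [percam, if_neg hf]
  refine List.mem_cons_of_mem _ (List.mem_append_right _ ?_)
  exact List.mem_filterMap.mpr ⟨i, List.mem_range.mpr hi, by rw [if_pos hc]⟩

theorem ups_pos_lt {n : Nat} {M : List (List Int)} {t : Nat} {f : Nat → Int} {p : Nat × Int}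
    (hp : p ∈ ups n M t f) : p.1 < 1 <<< n := by
  obtain ⟨cam, hcam, _, h⟩ := mem_ups_elim hp
  rcases h with rfl | ⟨i, hi, rfl⟩ | ⟨i, hi, _, rfl⟩
  · exact hcam
  · exact or_lt_shift hcam hi
  · exact hcam

-- characterisation of rowV --------------------------------------------------

theorem getD_replicate_self (W c : Nat) (v : Int) : (List.replicate W v).getD c v = v := by
  rw [List.getD_eq_getElem?_getD, List.getElem?_replicate]
  split <;> rfl

theorem rowV_zero (n : Nat) (M : List (List Int)) (c : Nat) :
    rowV n M 0 c = if c = 0 then 0 else -1 := by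
  rw [rowV, rowL, getD_set_int]
  by_cases hc : c = 0
  · subst hc; simp [one_shiftLeft_pos n]
  · rw [if_neg (by simp [Ne.symm hc]), if_neg hc]
    exact getD_replicate_self _ _ _

theorem rowV_succ (n : Nat) (M : List (List Int)) (t c : Nat) :
    rowV n M (t + 1) c
      = (ups n M t (rowV n M t)).foldl (fun a p => if p.1 = c then max a p.2 else a) (-1) := by
  have hf : (fun cam => (rowL n M t).getD cam (-1)) = rowV n M t := rfl
  rw [rowV, rowL, hf, relaxFold_getD _ _ _ (fun p hp => by
    rw [List.length_replicate]; exact ups_pos_lt hp)]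
  rw [getD_replicate_self]

theorem rowV_nonneg (n : Nat) (M : List (List Int)) :
    ∀ t c, rowV n M t c ≠ -1 → 0 ≤ rowV n M t c := by
  intro t
  induction t with
  | zero =>
    intro c h
    rw [rowV_zero] at *
    by_cases hc : c = 0 <;> simp [hc] at *
  | succ t ih =>
    intro c h
    rw [rowV_succ] at h ⊢
    rcases accFold_attain c (ups n M t (rowV n M t)) (-1) with hE | ⟨p, hp, hpc, hval⟩
    · exact absurd hE h
    · rw [hval]
      obtain ⟨cam, hcam, hf, hcase⟩ := mem_ups_elim hp
      have h0 : 0 ≤ rowV n M t cam := ih cam hf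
      rcases hcase with hq | ⟨i, hi, hq⟩ | ⟨i, hi, _, hq⟩ <;>
        · rw [hq]; omega

theorem rowV_ge_neg_one (n : Nat) (M : List (List Int)) (t c : Nat) : -1 ≤ rowV n M t c := by
  by_cases h : rowV n M t c = -1
  · omega
  · have := rowV_nonneg n M t c h; omega

-- a generic getD/set fact over any element type (used for the dp table of rows)
theorem getD_set_gen {α : Type} (l : List α) (m c : Nat) (v d : α) :
    (l.set m v).getD c d = if m = c ∧ m < l.length then v else l.getD c d := by
  by_cases hm : m = c ∧ m < l.length
  · obtain ⟨rfl, hlt⟩ := hm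
    simp [List.getD_eq_getElem?_getD, hlt]
  · rw [if_neg hm]
    by_cases hc : m = c
    · subst hc
      have hge : l.length ≤ m := by
        by_contra h; exact hm ⟨rfl, by omega⟩
      rw [List.set_eq_of_length_le hge]
    · simp [List.getD_eq_getElem?_getD, List.getElem?_set_ne hc]

theorem getD_replicate_lt {α : Type} {W c : Nat} (v d : α) (hc : c < W) :
    (List.replicate W v).getD c d = v := by
  rw [List.getD_eq_getElem?_getD, List.getElem?_replicate, if_pos hc]
  rfl

-- the memoized suffix recursion best(t, cam) of the hint, as a spec-level function:
-- bBest fuel t cam = best additional score from turn t on (fuel = K - t)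
def bBest (n : Nat) (M : List (List Int)) : Nat → Nat → Nat → Int
  | 0, _, _ => 0
  | fuel + 1, t, cam =>
    let res := bBest n M fuel (t + 1) cam
    let res := if bCover n M t cam then res + 1 else res
    (List.range n).foldl (fun r i => max r (bBest n M fuel (t + 1) (cam ||| (1 <<< i)))) res

-- bBest: one-step unfolding and bounds ---------------------------------------

theorem bBest_succ (n : Nat) (M : List (List Int)) (fuel t cam : Nat) :
    bBest n M (fuel + 1) t cam =
      (List.range n).foldl (fun r i => max r (bBest n M fuel (t + 1) (cam ||| (1 <<< i))))
        (if bCover n M t cam then bBest n M fuel (t + 1) cam + 1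
         else bBest n M fuel (t + 1) cam) := rfl

theorem bBest_ge_init (n : Nat) (M : List (List Int)) (fuel t cam : Nat) :
    (if bCover n M t cam then bBest n M fuel (t + 1) cam + 1 else bBest n M fuel (t + 1) cam)
      ≤ bBest n M (fuel + 1) t cam := by
  rw [bBest_succ]
  exact (PySem.List.le_foldl_max_int (List.range n)
    (fun i => bBest n M fuel (t + 1) (cam ||| (1 <<< i))) _).1

theorem bBest_ge_stay (n : Nat) (M : List (List Int)) (fuel t cam : Nat) :
    bBest n M fuel (t + 1) cam ≤ bBest n M (fuel + 1) t cam := by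
  refine le_trans ?_ (bBest_ge_init n M fuel t cam)
  by_cases h : bCover n M t cam <;> simp [h]

theorem bBest_ge_score (n : Nat) (M : List (List Int)) (fuel t cam : Nat)
    (hcov : bCover n M t cam = true) :
    bBest n M fuel (t + 1) cam + 1 ≤ bBest n M (fuel + 1) t cam := by
  have := bBest_ge_init n M fuel t cam
  rwa [if_pos hcov] at this

theorem bBest_ge_install (n : Nat) (M : List (List Int)) (fuel t cam i : Nat) (hi : i < n) :
    bBest n M fuel (t + 1) (cam ||| (1 <<< i)) ≤ bBest n M (fuel + 1) t cam := by
  rw [bBest_succ]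
  exact (PySem.List.le_foldl_max_int (List.range n)
    (fun i => bBest n M fuel (t + 1) (cam ||| (1 <<< i))) _).2 i (List.mem_range.mpr hi)

theorem bBest_nonneg (n : Nat) (M : List (List Int)) :
    ∀ (fuel t cam : Nat), 0 ≤ bBest n M fuel t cam := by
  intro fuel
  induction fuel with
  | zero => intro t cam; exact le_refl 0
  | succ fuel ih =>
    intro t cam
    refine le_trans ?_ (bBest_ge_stay n M fuel t cam)
    exact ih (t + 1) cam

-- the exchange invariant ------------------------------------------------------

def gfun (n : Nat) (M : List (List Int)) (k t c : Nat) : Int :=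
  if rowV n M t c = -1 then -1 else rowV n M t c + bBest n M (k - t) t c

def Gval (n : Nat) (M : List (List Int)) (k t : Nat) : Int :=
  (List.range (1 <<< n)).foldl (fun a c => max a (gfun n M k t c)) (-1)

theorem neg_one_le_Gval (n : Nat) (M : List (List Int)) (k t : Nat) : -1 ≤ Gval n M k t :=
  (PySem.List.le_foldl_max_int (List.range (1 <<< n)) (gfun n M k t) (-1)).1

theorem gfun_le_Gval (n : Nat) (M : List (List Int)) (k t : Nat) {c : Nat} (hc : c < 1 <<< n) :
    gfun n M k t c ≤ Gval n M k t :=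
  (PySem.List.le_foldl_max_int (List.range (1 <<< n)) (gfun n M k t) (-1)).2 c
    (List.mem_range.mpr hc)

theorem gfun_last (n : Nat) (M : List (List Int)) (k c : Nat) :
    gfun n M k k c = rowV n M k c := by
  rw [gfun, Nat.sub_self]
  by_cases h : rowV n M k c = -1
  · rw [if_pos h, h]
  · rw [if_neg h]
    show rowV n M k c + 0 = rowV n M k c
    omega

theorem Gval_last (n : Nat) (M : List (List Int)) (k : Nat) :
    Gval n M k k = (List.range (1 <<< n)).foldl (fun a c => max a (rowV n M k c)) (-1) := by
  rw [Gval]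
  simp only [gfun_last]

theorem Gval_zero (n : Nat) (M : List (List Int)) (k : Nat) :
    Gval n M k 0 = bBest n M k 0 0 := by
  have hpos := one_shiftLeft_pos n
  have hW : 1 <<< n = (1 <<< n - 1) + 1 := by omega
  have hg0 : gfun n M k 0 0 = bBest n M k 0 0 := by
    rw [gfun, rowV_zero]
    simp
  rw [Gval, hW, List.range_succ_eq_map, List.foldl_cons, List.foldl_map, hg0]
  have hb := bBest_nonneg n M k 0 0
  rw [max_eq_right (by omega)]
  apply foldl_max_const
  intro x _
  rw [gfun, rowV_zero, if_neg (Nat.succ_ne_zero x), if_pos rfl]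
  omega

theorem Gstep (n : Nat) (M : List (List Int)) (k t : Nat) (ht : t < k) :
    Gval n M k t = Gval n M k (t + 1) := by
  have hfuel : k - t = (k - (t + 1)) + 1 := by omega
  apply le_antisymm
  · -- every reachable state at t is dominated by a state at t+1
    apply foldl_max_le_int _ _ _ _ (neg_one_le_Gval n M k (t + 1))
    intro c hc
    rw [List.mem_range] at hc
    by_cases hr : rowV n M t c = -1
    · rw [gfun, if_pos hr]; exact neg_one_le_Gval n M k (t + 1)
    · have h0 : 0 ≤ rowV n M t c := rowV_nonneg n M t c hr
      rw [gfun, if_neg hr, hfuel, bBest_succ]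
      have key : (List.range n).foldl
          (fun r i => max r (bBest n M (k - (t + 1)) (t + 1) (c ||| (1 <<< i))))
          (if bCover n M t c then bBest n M (k - (t + 1)) (t + 1) c + 1
           else bBest n M (k - (t + 1)) (t + 1) c)
          ≤ Gval n M k (t + 1) - rowV n M t c := by
        apply foldl_max_le_int
        · by_cases hcov : bCover n M t c
          · rw [if_pos hcov]
            obtain ⟨i, hi', hcB⟩ := List.any_eq_true.mp hcov
            have hmem := mem_ups_score (f := rowV n M t) hc hr (List.mem_range.mp hi') hcB
            have h1 : rowV n M t c + 1 ≤ rowV n M (t + 1) c := by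
              rw [rowV_succ]; exact accFold_le_of_mem c _ (-1) _ hmem rfl
            have hne : rowV n M (t + 1) c ≠ -1 := by omega
            have hg : gfun n M k (t + 1) c
                = rowV n M (t + 1) c + bBest n M (k - (t + 1)) (t + 1) c := if_neg hne
            have hle := gfun_le_Gval n M k (t + 1) hc
            omega
          · rw [if_neg hcov]
            have hmem := mem_ups_stay (M := M) (t := t) (f := rowV n M t) hc hr
            have h1 : rowV n M t c ≤ rowV n M (t + 1) c := by
              rw [rowV_succ]; exact accFold_le_of_mem c _ (-1) _ hmem rfl
            have hne : rowV n M (t + 1) c ≠ -1 := by omega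
            have hg : gfun n M k (t + 1) c
                = rowV n M (t + 1) c + bBest n M (k - (t + 1)) (t + 1) c := if_neg hne
            have hle := gfun_le_Gval n M k (t + 1) hc
            omega
        · intro i hi'
          have hi := List.mem_range.mp hi'
          have hc' : c ||| (1 <<< i) < 1 <<< n := or_lt_shift hc hi
          have hmem := mem_ups_install (M := M) (t := t) (f := rowV n M t) hc hr hi
          have h1 : rowV n M t c ≤ rowV n M (t + 1) (c ||| (1 <<< i)) := by
            rw [rowV_succ]; exact accFold_le_of_mem _ _ (-1) _ hmem rfl
          have hne : rowV n M (t + 1) (c ||| (1 <<< i)) ≠ -1 := by omega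
          have hg : gfun n M k (t + 1) (c ||| (1 <<< i))
              = rowV n M (t + 1) (c ||| (1 <<< i))
                + bBest n M (k - (t + 1)) (t + 1) (c ||| (1 <<< i)) := if_neg hne
          have hle := gfun_le_Gval n M k (t + 1) hc'
          omega
      omega
  · apply foldl_max_le_int _ _ _ _ (neg_one_le_Gval n M k t)
    intro c hc
    rw [List.mem_range] at hc
    by_cases hr : rowV n M (t + 1) c = -1
    · rw [gfun, if_pos hr]; exact neg_one_le_Gval n M k t
    · have hchar := rowV_succ n M t c
      rcases accFold_attain c (ups n M t (rowV n M t)) (-1) with hE | ⟨p, hp, hpc, hval⟩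
      · rw [hchar] at hr; exact absurd hE hr
      · have hval' : rowV n M (t + 1) c = p.2 := by rw [hchar]; exact hval
        obtain ⟨cam, hcam, hf, hcase⟩ := mem_ups_elim hp
        have h0 : 0 ≤ rowV n M t cam := rowV_nonneg n M t cam hf
        have hgt : gfun n M k t cam = rowV n M t cam + bBest n M (k - t) t cam := if_neg hf
        have hG : gfun n M k t cam ≤ Gval n M k t := gfun_le_Gval n M k t hcam
        rw [gfun, if_neg hr, hval']
        rcases hcase with rfl | ⟨i, hi, rfl⟩ | ⟨i, hi, hcB, rfl⟩
        · -- stay edge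
          have hcc : cam = c := hpc
          subst hcc
          have hb : bBest n M (k - (t + 1)) (t + 1) cam ≤ bBest n M (k - t) t cam := by
            rw [hfuel]; exact bBest_ge_stay n M (k - (t + 1)) t cam
          show rowV n M t cam + bBest n M (k - (t + 1)) (t + 1) cam ≤ Gval n M k t
          omega
        · -- install edge
          have hcc : cam ||| (1 <<< i) = c := hpc
          subst hcc
          have hb : bBest n M (k - (t + 1)) (t + 1) (cam ||| (1 <<< i))
              ≤ bBest n M (k - t) t cam := by
            rw [hfuel]; exact bBest_ge_install n M (k - (t + 1)) t cam i hi
          show rowV n M t cam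
              + bBest n M (k - (t + 1)) (t + 1) (cam ||| (1 <<< i)) ≤ Gval n M k t
          omega
        · -- score edge
          have hcc : cam = c := hpc
          subst hcc
          have hcov : bCover n M t cam = true :=
            List.any_eq_true.mpr ⟨i, List.mem_range.mpr hi, hcB⟩
          have hb : bBest n M (k - (t + 1)) (t + 1) cam + 1 ≤ bBest n M (k - t) t cam := by
            rw [hfuel]; exact bBest_ge_score n M (k - (t + 1)) t cam hcov
          show rowV n M t cam + 1 + bBest n M (k - (t + 1)) (t + 1) cam ≤ Gval n M k t
          omega

theorem Gval_const (n : Nat) (M : List (List Int)) (k : Nat) :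
    ∀ d, d ≤ k → Gval n M k (k - d) = Gval n M k k := by
  intro d
  induction d with
  | zero => intro _; rw [Nat.sub_zero]
  | succ d ih =>
    intro hd
    have ht : k - (d + 1) < k := by omega
    have h1 : (k - (d + 1)) + 1 = k - d := by omega
    rw [Gstep n M k (k - (d + 1)) ht, h1, ih (by omega)]

-- A's cam-loop body is a relaxation fold over its per-cam update list ---------

-- the score loop as a fold over its (position, value) update pairs
theorem foldl_score (M : List (List Int)) (t cam : Nat) (v : Int) :
    ∀ (l : List Nat) (row : List Int),
      l.foldl (fun r i => if condB M t i cam then aRelax r cam (v + 1) else r) row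
        = (l.filterMap (fun i => if condB M t i cam then some ((cam, v + 1) : Nat × Int) else none)).foldl
            (fun r p => aRelax r p.1 p.2) row := by
  intro l
  induction l with
  | nil => intro row; rfl
  | cons x xs ih =>
    intro row
    by_cases hx : condB M t x cam = true
    · simp only [List.foldl_cons, List.filterMap_cons, if_pos hx, ih]
    · simp only [List.foldl_cons, List.filterMap_cons, if_neg hx, ih]

theorem aInner_eq (n : Nat) (M : List (List Int)) (t : Nat) (rowt row : List Int) (cam : Nat) :
    aInner n M t rowt row cam
      = (percam n M t (fun c => rowt.getD c (-1)) cam).foldl (fun r p => aRelax r p.1 p.2) row := by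
  rw [aInner, percam]
  by_cases hv : rowt.getD cam (-1) = -1
  · rw [if_pos hv, if_pos hv, List.foldl_nil]
  · rw [if_neg hv, if_neg hv]
    simp only [List.foldl_cons, List.foldl_append, List.foldl_map]
    rw [foldl_score]

theorem step_rowL (n : Nat) (M : List (List Int)) (j : Nat) :
    (List.range (1 <<< n)).foldl (aInner n M j (rowL n M j)) (List.replicate (1 <<< n) (-1))
      = rowL n M (j + 1) := by
  have hfun : aInner n M j (rowL n M j)
      = fun row cam => (percam n M j (fun c => (rowL n M j).getD c (-1)) cam).foldl
          (fun r p => aRelax r p.1 p.2) row :=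
    funext fun row => funext fun cam => aInner_eq n M j (rowL n M j) row cam
  rw [hfun, ← foldl_flatMap', rowL]
  rfl

-- the table loop --------------------------------------------------------------

def tstep (n : Nat) (M : List (List Int)) (dp : List (List Int)) (t : Nat) : List (List Int) :=
  dp.set (t + 1)
    ((List.range (1 <<< n)).foldl (aInner n M t (dp.getD t [])) (dp.getD (t + 1) []))

def dpStart (n k : Nat) : List (List Int) :=
  ((List.range (k + 1)).map (fun _ => List.replicate (1 <<< n) (-1 : Int))).set 0
    ((((List.range (k + 1)).map (fun _ => List.replicate (1 <<< n) (-1 : Int))).getD 0 []).set 0 0)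

theorem length_dpStart (n k : Nat) : (dpStart n k).length = k + 1 := by
  simp [dpStart]

theorem getD_dpStart (n k : Nat) (M : List (List Int)) (m : Nat) (hm : m ≤ k) :
    (dpStart n k).getD m [] = if m = 0 then rowL n M 0 else List.replicate (1 <<< n) (-1) := by
  have hmap : (List.range (k + 1)).map (fun _ => List.replicate (1 <<< n) (-1 : Int))
      = List.replicate (k + 1) (List.replicate (1 <<< n) (-1)) := by
    rw [List.map_const', List.length_range]
  rw [dpStart, hmap, getD_set_gen]
  by_cases hm0 : m = 0
  · subst hm0
    rw [if_pos ⟨rfl, by simp⟩, if_pos rfl,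
      getD_replicate_lt _ _ (by omega), rowL]
  · rw [if_neg (fun h => hm0 h.1.symm), if_neg hm0, getD_replicate_lt _ _ (by omega)]

theorem table_inv (n : Nat) (M : List (List Int)) (k : Nat) :
    ∀ j, j ≤ k →
      ((List.range j).foldl (tstep n M) (dpStart n k)).length = k + 1 ∧
      ∀ m, m ≤ k → ((List.range j).foldl (tstep n M) (dpStart n k)).getD m []
          = if m ≤ j then rowL n M m else List.replicate (1 <<< n) (-1) := by
  intro j
  induction j with
  | zero =>
    intro _
    refine ⟨length_dpStart n k, ?_⟩
    intro m hm
    rw [List.range_zero, List.foldl_nil, getD_dpStart n k M m hm]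
    by_cases hm0 : m = 0
    · subst hm0; rw [if_pos rfl, if_pos (le_refl 0)]
    · rw [if_neg hm0, if_neg (by omega)]
  | succ j ih =>
    intro hj
    obtain ⟨ihlen, ihget⟩ := ih (by omega)
    rw [List.range_succ, List.foldl_append, List.foldl_cons, List.foldl_nil]
    have hgj : ((List.range j).foldl (tstep n M) (dpStart n k)).getD j [] = rowL n M j := by
      rw [ihget j (by omega), if_pos (le_refl j)]
    have hgj1 : ((List.range j).foldl (tstep n M) (dpStart n k)).getD (j + 1) []
        = List.replicate (1 <<< n) (-1) := by
      rw [ihget (j + 1) (by omega), if_neg (by omega)]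
    constructor
    · rw [tstep, List.length_set, ihlen]
    · intro m hm
      rw [tstep, hgj, hgj1, step_rowL, getD_set_gen]
      by_cases hmj : m = j + 1
      · subst hmj
        rw [if_pos ⟨rfl, by rw [ihlen]; omega⟩, if_pos (le_refl _)]
      · rw [if_neg (fun h => hmj h.1.symm), ihget m hm]
        by_cases hle : m ≤ j
        · rw [if_pos hle, if_pos (by omega)]
        · rw [if_neg hle, if_neg (by omega)]

-- B-side: the value-iteration vector computes the suffix recursion -----------

def bStep (n : Nat) (M : List (List Int)) (best : List Int) (t : Int) : List Int :=
  (List.range (1 <<< n)).foldl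
    (fun new cam =>
      let res := best.getD cam 0
      let res := if bCover n M t.toNat cam then res + 1 else res
      let res := (List.range n).foldl
        (fun res i =>
          if best.getD (cam ||| (1 <<< i)) 0 > res then best.getD (cam ||| (1 <<< i)) 0
          else res) res
      new ++ [res])
    []

theorem if_gt_eq_max (a b : Int) : (if b > a then b else a) = max a b := by
  rcases lt_or_ge a b with h | h
  · rw [if_pos h, max_eq_right (le_of_lt h)]
  · rw [if_neg (not_lt.mpr h), max_eq_left h]

theorem getD_map_range' {f : Nat → Int} {W c : Nat} (d : Int) (hc : c < W) :
    ((List.range W).map f).getD c d = f c := by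
  rw [List.getD_eq_getElem?_getD, List.getElem?_map, List.getElem?_range hc]
  rfl

theorem foldl_congr_mem' {α β : Type} (l : List α) (f g : β → α → β) (init : β)
    (h : ∀ b a, a ∈ l → f b a = g b a) : l.foldl f init = l.foldl g init := by
  induction l generalizing init with
  | nil => rfl
  | cons x xs ih =>
    rw [List.foldl_cons, List.foldl_cons, h init x (by simp)]
    exact ih _ (fun b a ha => h b a (by simp [ha]))

theorem bStep_eq (n : Nat) (M : List (List Int)) (j k : Nat) (t : Int)
    (ht : t.toNat = k - (j + 1)) (hj : j < k) :
    bStep n M ((List.range (1 <<< n)).map (fun cam => bBest n M j (k - j) cam)) t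
      = (List.range (1 <<< n)).map (fun cam => bBest n M (j + 1) (k - (j + 1)) cam) := by
  rw [bStep, PySem.List.foldl_append_singleton_eq_map]
  apply List.map_congr_left
  intro cam hcam
  rw [List.mem_range] at hcam
  have hg : ∀ c, c < 1 <<< n →
      ((List.range (1 <<< n)).map (fun cam => bBest n M j (k - j) cam)).getD c 0
        = bBest n M j (k - j) c := fun c hc => getD_map_range' 0 hc
  rw [hg cam hcam, ht, bBest_succ]
  have hkj : k - (j + 1) + 1 = k - j := by omega
  rw [hkj]
  apply foldl_congr_mem'
  intro b i hi
  rw [hg _ (or_lt_shift hcam (List.mem_range.mp hi)), if_gt_eq_max]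

theorem bIter_inv (n : Nat) (M : List (List Int)) (K : Int) (hK : 0 ≤ K) :
    ∀ j, j ≤ K.toNat →
      (List.range j).foldl (fun best (jj : Nat) => bStep n M best (K - 1 - (jj : Int)))
          (List.replicate (1 <<< n) 0)
        = (List.range (1 <<< n)).map (fun cam => bBest n M j (K.toNat - j) cam) := by
  intro j
  induction j with
  | zero =>
    intro _
    rw [List.range_zero, List.foldl_nil,
      show (fun cam => bBest n M 0 (K.toNat - 0) cam) = (fun _ : Nat => (0 : Int)) from rfl,
      List.map_const', List.length_range]
  | succ j ih =>
    intro hj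
    rw [List.range_succ, List.foldl_append, List.foldl_cons, List.foldl_nil, ih (by omega)]
    exact bStep_eq n M j K.toNat (K - 1 - (j : Int)) (by omega) (by omega)

-- ===== VERDICT (by name: the statement is the Claim_ definition above) =====
theorem max_dolphins_dp_spec : Claim_equal_max_dolphins_dp := by
  intro N K M _ hpre
  obtain ⟨hN, hK, _⟩ := hpre
  unfold Spec_max_dolphins_dp
  have hB : max_dolphins_dp_alt N K M = bBest N.toNat M K.toNat 0 0 := by
    show ((PySem.List.pyRange (K - 1) (-1) (-1)).foldl (bStep N.toNat M)
        (List.replicate (1 <<< N.toNat) 0)).getD 0 0 = _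
    rw [PySem.List.pyRange_neg_one, List.foldl_map,
      show (K - 1 - (-1)).toNat = K.toNat from by omega,
      bIter_inv N.toNat M K hK K.toNat (le_refl _),
      getD_map_range' 0 (one_shiftLeft_pos N.toNat), Nat.sub_self]
  rw [hB]
  show (PySem.List.max?
      (((List.range K.toNat).foldl (tstep N.toNat M) (dpStart N.toNat K.toNat)).getD K.toNat [])
      (fun x => x)).getD 0 = bBest N.toNat M K.toNat 0 0
  set n := N.toNat with hn
  set k := K.toNat with hk
  rw [(table_inv n M k k (le_refl k)).2 k (le_refl k), if_pos (le_refl k)]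
  have hlen := length_rowL n M k
  have hpos := one_shiftLeft_pos n
  have hne : rowL n M k ≠ [] := by
    intro h; rw [h] at hlen; simp at hlen; omega
  obtain ⟨x, tl, hxt⟩ := List.exists_cons_of_ne_nil hne
  rw [hxt, PySem.List.max?_id_cons, Option.getD_some]
  have hx : x = rowV n M k 0 := by unfold rowV; rw [hxt]; rfl
  have hxge : (-1 : Int) ≤ x := by rw [hx]; exact rowV_ge_neg_one n M k 0
  have h1 : tl.foldl max x = (x :: tl).foldl max (-1) := by
    rw [List.foldl_cons, max_eq_right hxge]
  rw [h1, list_max_fold]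
  have hlen2 : (x :: tl).length = 1 <<< n := by rw [← hxt]; exact hlen
  rw [hlen2]
  have hfun : (fun (acc : Int) (c : Nat) => max acc ((x :: tl).getD c (-1)))
      = fun acc c => max acc (rowV n M k c) := by
    funext acc c; rw [← hxt]; rfl
  rw [hfun, ← Gval_last]
  have h2 := Gval_const n M k k (le_refl k)
  rw [Nat.sub_self] at h2
  rw [← h2, Gval_zero]
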